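-- pv_equiv track=rewrite | github.com/jimmynguyen/advent-of-code | solutions/2025/day03/day03.py | compute_bank_output_joltage
-- ===== SOURCE A (Python) =====
-- def compute_bank_output_joltage(
--     battery_bank: list[int],
--     num_batteries_remaining: int,
--     bank_output_joltage: str = "",
-- ):
--     if num_batteries_remaining == 0:
--         return bank_output_joltage
--     battery_bank_with_exclusions = list(battery_bank)
--     for _ in range(len(battery_bank)):
--         max_battery = max(battery_bank_with_exclusions)
--         idx_max_battery = battery_bank_with_exclusions.index(max_battery)
--         if len(battery_bank) - idx_max_battery > num_batteries_remaining - 1: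
--             new_bank_output_joltage = compute_bank_output_joltage(
--                 battery_bank[idx_max_battery+1:],
--                 num_batteries_remaining-1,
--                 bank_output_joltage + str(max_battery)
--             )
--             if new_bank_output_joltage is not None:
--                 return new_bank_output_joltage
--         # exclude idx_max_battery from battery bank on next max search
--         battery_bank_with_exclusions[idx_max_battery] = -1
--     raise Exception("Failed to compute bank output joltage")
-- ===== SOURCE B (Python) =====
-- def compute_bank_output_joltage(
--     battery_bank: list[int],
--     num_batteries_remaining: int,
--     bank_output_joltage: str = "",
-- ):
--     while num_batteries_remaining > 0:
--         window = battery_bank[:len(battery_bank) - num_batteries_remaining + 1]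
--         best = max(window)
--         idx = window.index(best)
--         bank_output_joltage += str(best)
--         battery_bank = battery_bank[idx + 1:]
--         num_batteries_remaining -= 1
--     return bank_output_joltage
-- ===== Notes on version B (the rewrite author's own statement) =====
-- stated objective: simpler
-- what changed: A recursively searches the global maximum over an exclusion copy of the bank, repeatedly marking infeasible maxima with a -1 sentinel until a feasible one is found; B drops the exclusion machinery entirely and directly takes the leftmost maximum of the feasible window prefix battery_bank[:n-k+1] at each step.
-- crash fix: A raises exactly when num_batteries_remaining is outside [0, len(battery_bank)] or the greedy (lexicographically largest) pick sequence contains a pick <= -2 followed by a strictly larger pick, where A's -1 sentinel dead-ends every branch (Exception); on negative counts B returns the accumulator unchanged and on the sentinel dead-ends B returns the greedy concatenation (e.g. ([-5,-2],2,'') -> '-5-2'), while for counts above len(battery_bank) B raises too. — e.g. on compute_bank_output_joltage([-5, -2], 2, ""): A raises Exception, B returns "-5-2"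
import Mathlib
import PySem

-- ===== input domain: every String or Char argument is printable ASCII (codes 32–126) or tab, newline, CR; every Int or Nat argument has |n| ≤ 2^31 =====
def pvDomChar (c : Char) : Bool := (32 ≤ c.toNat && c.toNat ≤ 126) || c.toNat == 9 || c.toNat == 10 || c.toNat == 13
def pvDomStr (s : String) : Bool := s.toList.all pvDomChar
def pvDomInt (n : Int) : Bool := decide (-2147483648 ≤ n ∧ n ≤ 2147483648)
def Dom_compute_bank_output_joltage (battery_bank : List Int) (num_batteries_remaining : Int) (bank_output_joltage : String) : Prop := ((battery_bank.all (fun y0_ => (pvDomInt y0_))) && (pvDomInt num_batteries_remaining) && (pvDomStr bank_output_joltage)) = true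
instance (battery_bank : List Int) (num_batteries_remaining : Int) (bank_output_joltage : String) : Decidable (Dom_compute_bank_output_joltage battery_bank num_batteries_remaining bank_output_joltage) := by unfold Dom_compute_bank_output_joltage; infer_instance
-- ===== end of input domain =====

-- B replaces A's global-max search with -1 sentinel exclusions by a direct leftmost-max pick in the
-- feasible window prefix (objective: simpler). A's raising paths are excluded exactly by Pre_ below.

-- ===== PORT A =====
-- A is a recursive Python function with an inner exclusion loop; `fuel` (outer) is a totality device:
-- it starts at bank.length + 1, which exceeds the recursion depth A can reach (the bank shrinks by at
-- least one element per recursive call), so the fuel-exhausted "" is never reached where A returns.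
-- The inner loop runs exactly range(len(battery_bank)) times, as in A; "" stands for A's raise paths.
-- inner exclusion loop: `rec` is the recursive call of the enclosing function, `f` the loop counter
def pvA_loop (rec : List Int → Int → String → String) (bank : List Int) (k : Int) (acc : String)
    (excl : List Int) (f : Nat) : String :=
  match f with
  | 0 => ""  -- loop exhausted: raise Exception
  | f' + 1 =>
    match PySem.List.max? excl (fun y => y) with
    | none => ""  -- unreachable: excl nonempty whenever the loop body runs
    | some m =>
      let idx : Nat := (PySem.List.index? excl m).getD 0
      if (bank.length : Int) - (idx : Int) > k - 1 then
        rec (PySem.List.slice bank (some ((idx : Int) + 1)) none) (k - 1)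
          (acc ++ PySem.Int.toStr m)
      else pvA_loop rec bank k acc (excl.set idx (-1)) f'

def pvA_compute : Nat → List Int → Int → String → String
  | 0, _, _, _ => ""
  | fuel + 1, bank, k, acc =>
    if k = 0 then acc
    else pvA_loop (pvA_compute fuel) bank k acc bank bank.length

def compute_bank_output_joltage (battery_bank : List Int) (num_batteries_remaining : Int) (bank_output_joltage : String) : String :=
  pvA_compute (battery_bank.length + 1) battery_bank num_batteries_remaining bank_output_joltage

-- ===== PORT B =====
-- B's while loop as fuelled tail recursion over the loop state (bank, k, acc); the fuel
-- bank.length + 1 exceeds the number of iterations the loop can make (k decreases each turn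
-- and inside Pre_ k ≤ len), so the fuel-exhausted "" is never reached where B returns.
def pvB_go : Nat → List Int → Int → String → String
  | 0, _, _, _ => ""  -- unreachable: the initial fuel exceeds the iteration count
  | fuel + 1, battery_bank, num_batteries_remaining, bank_output_joltage =>
    if num_batteries_remaining ≤ 0 then bank_output_joltage
    else
      match PySem.List.max? (PySem.List.slice battery_bank none (some ((battery_bank.length : Int) - num_batteries_remaining + 1))) (fun y => y) with
      | none => ""  -- max([]) raises: outside Pre_
      | some best =>
        let idx : Nat := (PySem.List.index? (PySem.List.slice battery_bank none (some ((battery_bank.length : Int) - num_batteries_remaining + 1))) best).getD 0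
        pvB_go fuel (PySem.List.slice battery_bank (some ((idx : Int) + 1)) none)
          (num_batteries_remaining - 1) (bank_output_joltage ++ PySem.Int.toStr best)

def compute_bank_output_joltage_alt (battery_bank : List Int) (num_batteries_remaining : Int) (bank_output_joltage : String) : String :=
  pvB_go (battery_bank.length + 1) battery_bank num_batteries_remaining bank_output_joltage

-- ===== PRECONDITION & SPEC =====
-- strict lexicographic comparison of two integer lists
def pvLexLt : List Int → List Int → Bool
  | [], [] => false
  | [], _ :: _ => true
  | _ :: _, [] => false
  | x :: xs, y :: ys => decide (x < y) || (x == y && pvLexLt xs ys)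

-- no element ≤ -2 is followed by a strictly larger element
def pvGood : List Int → Bool
  | [] => true
  | x :: xs => ((decide (-2 < x)) || xs.all (fun y => decide (y ≤ x))) && pvGood xs

-- Pre_ excludes exactly the inputs on which A raises: num_batteries_remaining outside
-- [0, len(battery_bank)], or the lexicographically largest length-k subsequence (= the greedy pick
-- sequence) contains a pick ≤ -2 followed by a strictly larger pick — there A's -1 exclusion
-- sentinel dominates every remaining candidate and the search dead-ends in `raise Exception`.
def Pre_compute_bank_output_joltage (battery_bank : List Int) (num_batteries_remaining : Int) (bank_output_joltage : String) : Prop :=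
  0 ≤ num_batteries_remaining ∧ num_batteries_remaining ≤ (battery_bank.length : Int) ∧
    ((List.sublistsLen num_batteries_remaining.toNat battery_bank).all (fun L =>
      !((List.sublistsLen num_batteries_remaining.toNat battery_bank).all (fun M => !pvLexLt L M))
        || pvGood L)) = true
instance (battery_bank : List Int) (num_batteries_remaining : Int) (bank_output_joltage : String) : Decidable (Pre_compute_bank_output_joltage battery_bank num_batteries_remaining bank_output_joltage) := by unfold Pre_compute_bank_output_joltage; infer_instance

def pvWitness_compute_bank_output_joltage : List Int × Int × String := ([3, 1, 2], 2, "")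

-- A raises exactly when num_batteries_remaining is outside [0, len] or the greedy pick sequence has a
-- pick ≤ -2 followed by a larger one; B returns the accumulator (negative count) resp. the greedy
-- concatenation (sentinel dead-end) there.  (For counts above len, B raises as well: not in Raises_.)
def Raises_compute_bank_output_joltage (battery_bank : List Int) (num_batteries_remaining : Int) (bank_output_joltage : String) : Prop :=
  num_batteries_remaining < 0 ∨
  (0 ≤ num_batteries_remaining ∧ num_batteries_remaining ≤ (battery_bank.length : Int) ∧
    ((List.sublistsLen num_batteries_remaining.toNat battery_bank).all (fun L =>
      !((List.sublistsLen num_batteries_remaining.toNat battery_bank).all (fun M => !pvLexLt L M))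
        || pvGood L)) = false)
instance (battery_bank : List Int) (num_batteries_remaining : Int) (bank_output_joltage : String) : Decidable (Raises_compute_bank_output_joltage battery_bank num_batteries_remaining bank_output_joltage) := by unfold Raises_compute_bank_output_joltage; infer_instance

def pvRaiseWitness_compute_bank_output_joltage : List Int × Int × String := ([-5, -2], 2, "")
def pvRaiseWitnessOut_compute_bank_output_joltage : String := "-5-2"

def Spec_compute_bank_output_joltage (battery_bank : List Int) (num_batteries_remaining : Int) (bank_output_joltage : String) (out : String) : Prop := out = compute_bank_output_joltage_alt battery_bank num_batteries_remaining bank_output_joltage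
instance (battery_bank : List Int) (num_batteries_remaining : Int) (bank_output_joltage : String) (out : String) : Decidable (Spec_compute_bank_output_joltage battery_bank num_batteries_remaining bank_output_joltage out) := by unfold Spec_compute_bank_output_joltage; infer_instance

-- ===== CLAIM (what is proved, stated in full; the proofs are below) =====
def Claim_equal_compute_bank_output_joltage : Prop := ∀ (battery_bank : List Int) (num_batteries_remaining : Int) (bank_output_joltage : String), Dom_compute_bank_output_joltage battery_bank num_batteries_remaining bank_output_joltage → Pre_compute_bank_output_joltage battery_bank num_batteries_remaining bank_output_joltage → Spec_compute_bank_output_joltage battery_bank num_batteries_remaining bank_output_joltage (compute_bank_output_joltage battery_bank num_batteries_remaining bank_output_joltage)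

def Claim_raises_compute_bank_output_joltage : Prop := (∀ (battery_bank : List Int) (num_batteries_remaining : Int) (bank_output_joltage : String), Dom_compute_bank_output_joltage battery_bank num_batteries_remaining bank_output_joltage → Raises_compute_bank_output_joltage battery_bank num_batteries_remaining bank_output_joltage → ¬ Pre_compute_bank_output_joltage battery_bank num_batteries_remaining bank_output_joltage) ∧ (Dom_compute_bank_output_joltage (pvRaiseWitness_compute_bank_output_joltage.1) (pvRaiseWitness_compute_bank_output_joltage.2.1) (pvRaiseWitness_compute_bank_output_joltage.2.2) ∧ Raises_compute_bank_output_joltage (pvRaiseWitness_compute_bank_output_joltage.1) (pvRaiseWitness_compute_bank_output_joltage.2.1) (pvRaiseWitness_compute_bank_output_joltage.2.2) ∧ compute_bank_output_joltage_alt (pvRaiseWitness_compute_bank_output_joltage.1) (pvRaiseWitness_compute_bank_output_joltage.2.1) (pvRaiseWitness_compute_bank_output_joltage.2.2) = pvRaiseWitnessOut_compute_bank_output_joltage)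

-- ===== LEMMAS AND PROOFS =====

-- the greedy pick value sequence (proof-side only): leftmost maximum of the feasible window, repeat
def pvPicks (a : List Int) (k : Int) : List Int :=
  if h : k ≤ 0 ∨ a = [] then []
  else
    match PySem.List.max? (a.take (a.length - k.toNat + 1)) (fun y => y) with
    | none => []
    | some w => w :: pvPicks (a.drop ((PySem.List.index? a w).getD 0 + 1)) (k - 1)
termination_by a.length
decreasing_by
  push_neg at h
  have h1 : 0 < a.length := List.length_pos_iff.mpr h.2
  simp only [List.length_drop]
  omega

theorem pv_picks_nil (a : List Int) (k : Int) (hk : k ≤ 0) : pvPicks a k = [] := by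
  rw [pvPicks, dif_pos (Or.inl hk)]

theorem pv_picks_cons (a : List Int) (k : Int) (w : Int) (j : Nat)
    (hk : 1 ≤ k) (hane : a ≠ [])
    (hmax : PySem.List.max? (a.take (a.length - k.toNat + 1)) (fun y => y) = some w)
    (hj : PySem.List.index? a w = some j) :
    pvPicks a k = w :: pvPicks (a.drop (j + 1)) (k - 1) := by
  rw [pvPicks, dif_neg (by push_neg; exact ⟨by omega, hane⟩)]
  rw [hmax]  -- scrutinee
  dsimp only
  rw [hj]
  rfl

-- selection of the window maximum and its leftmost index
theorem pv_sel (a : List Int) (k : Int) (h1 : 1 ≤ k) (h2 : k ≤ (a.length : Int)) :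
    ∃ w j, PySem.List.max? (a.take (a.length - k.toNat + 1)) (fun y => y) = some w ∧
      PySem.List.index? a w = some j ∧ j < a.length - k.toNat + 1 := by
  have hlen1 : 1 ≤ a.length := by exact_mod_cast le_trans h1 h2
  have hwne : a.take (a.length - k.toNat + 1) ≠ [] := by
    intro h
    have h2' := congrArg List.length h
    simp only [List.length_take, List.length_nil] at h2'
    omega
  obtain ⟨w, hmax⟩ : ∃ w, PySem.List.max? (a.take (a.length - k.toNat + 1)) (fun y => y) = some w := by
    cases hcase : PySem.List.max? (a.take (a.length - k.toNat + 1)) (fun y => y) with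
    | none => exact absurd ((PySem.List.max?_eq_none_iff _ _).mp hcase) hwne
    | some w => exact ⟨w, rfl⟩
  have hwmem : w ∈ a.take (a.length - k.toNat + 1) := PySem.List.max?_mem hmax
  obtain ⟨j0, hj0lt, hj0⟩ := List.mem_take_iff_getElem.mp hwmem
  obtain ⟨j, hj⟩ : ∃ j, PySem.List.index? a w = some j := by
    cases hcase : PySem.List.index? a w with
    | none =>
      exact absurd ((PySem.List.index?_eq_none_iff _ _).mp hcase)
        (by simp [List.mem_of_mem_take hwmem])
    | some j => exact ⟨j, rfl⟩
  obtain ⟨hjlt, hjval, hjmin⟩ := PySem.List.getElem_of_index?_eq_some hj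
  refine ⟨w, j, hmax, hj, ?_⟩
  by_contra hjw
  push_neg at hjw
  exact hjmin j0 (by omega) hj0

theorem pv_picks_length : ∀ (n : Nat) (a : List Int) (k : Int), a.length = n →
    0 ≤ k → k ≤ (n : Int) → (pvPicks a k).length = k.toNat := by
  intro n
  induction n using Nat.strong_induction_on with
  | _ n IH =>
    intro a k hn h0 hkn
    by_cases hk0 : k ≤ 0
    · rw [pv_picks_nil _ _ hk0]
      simp
      omega
    · have hk1 : 1 ≤ k := by omega
      have hane : a ≠ [] := by
        intro h; rw [h] at hn; simp at hn; omega
      obtain ⟨w, j, hmax, hj, hjW⟩ := pv_sel a k hk1 (by omega)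
      rw [pv_picks_cons a k w j hk1 hane hmax hj]
      simp only [List.length_cons]
      rw [IH (n - (j + 1)) (by omega) (a.drop (j + 1)) (k - 1)
        (by simp [List.length_drop, hn]) (by omega) (by push_cast; omega)]
      omega

theorem pv_picks_sublist : ∀ (n : Nat) (a : List Int) (k : Int), a.length = n →
    0 ≤ k → k ≤ (n : Int) → (pvPicks a k).Sublist a := by
  intro n
  induction n using Nat.strong_induction_on with
  | _ n IH =>
    intro a k hn h0 hkn
    by_cases hk0 : k ≤ 0
    · rw [pv_picks_nil _ _ hk0]
      exact List.nil_sublist a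
    · have hk1 : 1 ≤ k := by omega
      have hane : a ≠ [] := by
        intro h; rw [h] at hn; simp at hn; omega
      obtain ⟨w, j, hmax, hj, hjW⟩ := pv_sel a k hk1 (by omega)
      obtain ⟨hjlt, hjval, _⟩ := PySem.List.getElem_of_index?_eq_some hj
      rw [pv_picks_cons a k w j hk1 hane hmax hj]
      have hsub' : (pvPicks (a.drop (j + 1)) (k - 1)).Sublist (a.drop (j + 1)) :=
        IH (n - (j + 1)) (by omega) (a.drop (j + 1)) (k - 1)
          (by simp [List.length_drop, hn]) (by omega) (by push_cast; omega)
      have h1 : [w].Sublist (a.take (j + 1)) := by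
        rw [List.take_succ]
        have hgj : a[j]? = some w := by
          rw [List.getElem?_eq_getElem hjlt, hjval]
        rw [hgj]
        simpa using List.sublist_append_right (a.take j) [w]
      have := List.Sublist.append h1 hsub'
      rw [List.take_append_drop] at this
      exact this

theorem pv_lexmax : ∀ (n : Nat) (a : List Int) (k : Int) (M : List Int), a.length = n →
    0 ≤ k → k ≤ (n : Int) → M.Sublist a → M.length = k.toNat →
    pvLexLt (pvPicks a k) M = false := by
  intro n
  induction n using Nat.strong_induction_on with
  | _ n IH =>
    intro a k M hn h0 hkn hMs hMl
    by_cases hk0 : k ≤ 0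
    · have hkeq : k = 0 := by omega
      subst hkeq
      rw [pv_picks_nil _ _ (by omega)]
      have : M = [] := List.eq_nil_of_length_eq_zero (by simpa using hMl)
      subst this
      rfl
    · have hk1 : 1 ≤ k := by omega
      have hane : a ≠ [] := by
        intro h; rw [h] at hn; simp at hn; omega
      obtain ⟨w, j, hmax, hj, hjW⟩ := pv_sel a k hk1 (by omega)
      obtain ⟨hjlt, hjval, hjmin⟩ := PySem.List.getElem_of_index?_eq_some hj
      rw [pv_picks_cons a k w j hk1 hane hmax hj]
      cases M with
      | nil => simp at hMl; omega
      | cons y M' =>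
        obtain ⟨r₁, r₂, ha, hyr, hM'⟩ := List.cons_sublist_iff.mp hMs
        obtain ⟨p, q, hr1⟩ := List.append_of_mem hyr
        have ha' : a = (p ++ [y]) ++ (q ++ r₂) := by
          rw [ha, hr1]; simp
        have hM'2 : M'.Sublist (q ++ r₂) := hM'.trans (List.sublist_append_right q r₂)
        have hlens : n = p.length + 1 + (q.length + r₂.length) := by
          rw [← hn, ha']; simp; omega
        have hMl' : M'.length = k.toNat - 1 := by simp at hMl; omega
        have hlenM' : M'.length ≤ q.length + r₂.length := by
          have := hM'2.length_le
          simpa using this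
        have hpW : p.length < a.length - k.toNat + 1 := by omega
        have ha2 : a = p ++ (y :: (q ++ r₂)) := by
          rw [ha, hr1]; simp
        have hgy? : a[p.length]? = some y := by
          rw [ha2, List.getElem?_append_right (le_refl _)]
          simp
        have hgy : a[p.length]'(by omega) = y := by
          have h2 := List.getElem?_eq_getElem (l := a) (i := p.length) (by omega)
          rw [hgy?] at h2
          exact (Option.some.inj h2).symm
        have hymem : y ∈ a.take (a.length - k.toNat + 1) :=
          List.mem_take_iff_getElem.mpr ⟨p.length, by omega, hgy⟩
        have hyw : y ≤ w := PySem.List.max?_isMax hmax y hymem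
        simp only [pvLexLt, Bool.or_eq_false_iff, Bool.and_eq_false_iff,
          decide_eq_false_iff_not, beq_eq_false_iff_ne, not_lt]
        refine ⟨hyw, ?_⟩
        by_cases hwy : w = y
        · right
          subst hwy
          have hjp : j ≤ p.length := by
            by_contra hjp
            push_neg at hjp
            exact hjmin p.length hjp hgy
          have hdropeq : a.drop (p.length + 1) = q ++ r₂ := by
            conv_lhs => rw [ha']
            have h3 : List.drop ((p ++ [w]).length) ((p ++ [w]) ++ (q ++ r₂)) = q ++ r₂ :=
              List.drop_left
            simpa using h3
          have hM'3 : M'.Sublist (a.drop (j + 1)) := by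
            refine (hM'2.trans ?_)
            rw [← hdropeq]
            have : a.drop (p.length + 1) = (a.drop (j + 1)).drop (p.length - j) := by
              rw [List.drop_drop]
              congr 1
              omega
            rw [this]
            exact List.drop_sublist _ _
          exact IH (n - (j + 1)) (by omega) (a.drop (j + 1)) (k - 1) M'
            (by simp [List.length_drop, hn]) (by omega) (by push_cast; omega) hM'3
            (by omega)
        · left
          intro h
          apply hwy
          omega

theorem pv_all_le : ∀ (n : Nat) (a : List Int) (k : Int), a.length = n →
    1 ≤ k → k ≤ (n : Int) → ∀ x ∈ a, ∃ p ∈ pvPicks a k, x ≤ p := by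
  intro n
  induction n using Nat.strong_induction_on with
  | _ n IH =>
    intro a k hn hk1 hkn x hx
    have hane : a ≠ [] := by
      intro h; rw [h] at hn; simp at hn; omega
    obtain ⟨w, j, hmax, hj, hjW⟩ := pv_sel a k hk1 (by omega)
    rw [pv_picks_cons a k w j hk1 hane hmax hj]
    rw [← List.take_append_drop (a.length - k.toNat + 1) a] at hx
    rcases List.mem_append.mp hx with hxt | hxd
    · exact ⟨w, List.mem_cons_self, PySem.List.max?_isMax hmax x hxt⟩
    · have hk2 : 2 ≤ k := by
        by_contra hk2
        have hkeq : k = 1 := by omega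
        subst hkeq
        have hWn : a.length - (1 : Int).toNat + 1 = a.length := by
          have h1n : (1 : Int) ≤ (n : Int) := le_trans hk1 hkn
          have h1n' : 1 ≤ n := by exact_mod_cast h1n
          simp
          omega
        rw [hWn, List.drop_length] at hxd
        exact absurd hxd (List.not_mem_nil)
      have hxd' : x ∈ a.drop (j + 1) := by
        refine (List.drop_sublist (a.length - k.toNat + 1 - (j + 1)) (a.drop (j + 1))).subset ?_
        rw [List.drop_drop]
        have : j + 1 + (a.length - k.toNat + 1 - (j + 1)) = a.length - k.toNat + 1 := by omega
        rw [this]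
        exact hxd
      obtain ⟨p, hp, hxp⟩ := IH (n - (j + 1)) (by omega) (a.drop (j + 1)) (k - 1)
        (by simp [List.length_drop, hn]) (by omega) (by push_cast; omega) x hxd'
      exact ⟨p, List.mem_cons_of_mem _ hp, hxp⟩

-- A's exclusion loop, run on any exclusion state excl that agrees with bank on the feasible window
-- [0, W) and carries either the original value or the -1 sentinel elsewhere, picks exactly the
-- leftmost occurrence j of the window maximum w and recurses on bank[j+1:].
theorem pv_loop (f : Nat) (bank : List Int) (k : Int) (acc : String)
    (w : Int) (j W : Nat)
    (hk1 : 1 ≤ k) (hW : (W : Int) = (bank.length : Int) - k + 1)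
    (hmax : PySem.List.max? (bank.take W) (fun y => y) = some w)
    (hj : PySem.List.index? bank w = some j) (hjW : j < W) :
    ∀ (t : Nat) (excl : List Int),
    excl.length = bank.length →
    (∀ i, i < W → excl[i]? = bank[i]?) →
    (∀ i, W ≤ i → excl[i]? = bank[i]? ∨ excl[i]? = some (-1)) →
    (-1 ≤ w ∨ ∀ x ∈ excl, x ≤ w) →
    excl.countP (fun x => decide (w < x)) < t →
    pvA_loop (pvA_compute f) bank k acc excl t
      = pvA_compute f (PySem.List.slice bank (some ((j : Int) + 1)) none) (k - 1)
          (acc ++ PySem.Int.toStr w) := by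
  have hWn : W ≤ bank.length := by omega
  obtain ⟨hjlt, hjval, hjmin⟩ := PySem.List.getElem_of_index?_eq_some hj
  have hfb : ∀ i (hi : i < bank.length), i < W → bank[i] ≤ w := by
    intro i hi hiW
    exact PySem.List.max?_isMax hmax bank[i]
      (List.mem_take_iff_getElem.mpr ⟨i, by omega, rfl⟩)
  intro t
  induction t with
  | zero => intro excl _ _ _ _ hfuel; omega
  | succ t ih =>
    intro excl hlen hfeas hinf hw hfuel
    have hexne : excl ≠ [] := by
      intro h; rw [h] at hlen; simp at hlen; omega
    obtain ⟨m, hm⟩ : ∃ m, PySem.List.max? excl (fun y => y) = some m := by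
      cases hcase : PySem.List.max? excl (fun y => y) with
      | none => exact absurd ((PySem.List.max?_eq_none_iff _ _).mp hcase) hexne
      | some m => exact ⟨m, rfl⟩
    have hjex : excl[j]? = some w := by
      rw [hfeas j hjW, List.getElem?_eq_getElem (by omega), hjval]
    have hwmem : w ∈ excl := List.mem_of_getElem? hjex
    have hwm : w ≤ m := PySem.List.max?_isMax hm w hwmem
    rw [pvA_loop]
    rw [hm]
    rcases eq_or_lt_of_le hwm with heq | hlt
    · -- the maximum of excl is the window maximum: its leftmost index is j, which is feasible
      subst heq
      have hidx : PySem.List.index? excl w = some j := by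
        rw [PySem.List.index?_eq_idxOf?, List.idxOf?_eq_some_iff]
        refine ⟨by omega, ?_, ?_⟩
        · have := List.getElem?_eq_getElem (l := excl) (i := j) (by omega)
          rw [this] at hjex; exact Option.some.inj hjex
        · intro i hij
          have hie : excl[i]? = bank[i]? := hfeas i (by omega)
          have h1 := List.getElem?_eq_getElem (l := excl) (i := i) (by omega)
          have h2 := List.getElem?_eq_getElem (l := bank) (i := i) (by omega)
          rw [h1, h2] at hie
          rw [Option.some.inj hie]
          exact hjmin i hij
      split
      · next heq => exact absurd heq (by simp)
      · next m2 heq =>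
        cases Option.some.inj heq
        rw [hidx]
        simp only [Option.getD_some]
        rw [if_pos (by omega)]
    · -- the maximum of excl is larger: it sits at an infeasible index; exclude it and repeat
      have hmmem : m ∈ excl := PySem.List.max?_mem hm
      obtain ⟨i, hi⟩ : ∃ i, PySem.List.index? excl m = some i := by
        cases hcase : PySem.List.index? excl m with
        | none => exact absurd ((PySem.List.index?_eq_none_iff _ _).mp hcase) (by simp [hmmem])
        | some i => exact ⟨i, rfl⟩
      obtain ⟨hilt, hie, _⟩ := PySem.List.getElem_of_index?_eq_some hi
      have hiW : W ≤ i := by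
        by_contra hiw
        push_neg at hiw
        have h1 := hfeas i hiw
        have h2 := List.getElem?_eq_getElem (l := excl) (i := i) hilt
        have h3 := List.getElem?_eq_getElem (l := bank) (i := i) (by omega)
        rw [h2, h3] at h1
        have : bank[i] ≤ w := hfb i (by omega) hiw
        rw [← Option.some.inj h1, hie] at this
        omega
      have hwneg : -1 ≤ w := by
        rcases hw with h | h
        · exact h
        · exact absurd (h m hmmem) (by omega)
      split
      · next heq => exact absurd heq (by simp)
      · next m2 heq =>
        cases Option.some.inj heq
        rw [hi]
        simp only [Option.getD_some]
        rw [if_neg (by omega)]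
        apply ih
        · rw [List.length_set]; exact hlen
        · intro i2 hi2
          rw [List.getElem?_set_ne (by omega)]
          exact hfeas i2 hi2
        · intro i2 hi2
          by_cases hii : i2 = i
          · subst hii
            right
            rw [List.getElem?_set_self hilt]
          · rw [List.getElem?_set_ne (by omega)]
            exact hinf i2 hi2
        · exact Or.inl hwneg
        · rw [List.countP_set hilt]
          have hcnt : 0 < excl.countP (fun x => decide (w < x)) := by
            rw [List.countP_pos_iff]
            exact ⟨m, hmmem, by simpa using hlt⟩
          rw [hie]
          simp only [decide_eq_true_eq, if_pos hlt, if_neg (by omega : ¬ (w < -1))]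
          omega

theorem pv_main : ∀ (n : Nat) (bank : List Int) (k : Int) (acc : String) (F F2 : Nat),
    bank.length = n → n < F → n < F2 → 0 ≤ k → k ≤ (n : Int) →
    pvGood (pvPicks bank k) = true →
    pvA_compute F bank k acc = pvB_go F2 bank k acc := by
  intro n
  induction n using Nat.strong_induction_on with
  | _ n IH =>
    intro bank k acc F F2 hn hF hF2 h0 hkn hg
    obtain ⟨f, rfl⟩ : ∃ f, F = f + 1 := ⟨F - 1, by omega⟩
    obtain ⟨f2, rfl⟩ : ∃ g, F2 = g + 1 := ⟨F2 - 1, by omega⟩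
    by_cases hk0 : k = 0
    · subst hk0
      rw [pvA_compute, pvB_go]
      simp
    · have hk1 : 1 ≤ k := by omega
      have hn1 : 1 ≤ n := by
        have : (1 : Int) ≤ (n : Int) := le_trans hk1 hkn
        exact_mod_cast this
      have hane : bank ≠ [] := by
        intro h; rw [h] at hn; simp at hn; omega
      -- the feasible window and its leftmost maximum
      set W : Nat := n - k.toNat + 1 with hWdef
      have hW : (W : Int) = (bank.length : Int) - k + 1 := by
        rw [hn]; push_cast; omega
      have hsl : PySem.List.slice bank none (some ((bank.length : Int) - k + 1))
          = bank.take W := by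
        rw [PySem.List.slice_to bank (by omega)]
        congr 1
        omega
      have hkt : (k.toNat : Int) = k := Int.toNat_of_nonneg h0
      obtain ⟨w, j, hmax0, hj, hjW0⟩ := pv_sel bank k hk1 (by omega)
      have hmax : PySem.List.max? (bank.take W) (fun y => y) = some w := by
        rw [hWdef, ← hn]; exact hmax0
      have hjW : j < W := by rw [hWdef, ← hn]; exact hjW0
      obtain ⟨hjlt, hjval, hjmin⟩ := PySem.List.getElem_of_index?_eq_some hj
      have hwmem : w ∈ bank.take W := PySem.List.max?_mem hmax
      -- B picks (w, j) directly from the window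
      have hwidx : PySem.List.index? (bank.take W) w = some j := by
        rw [PySem.List.index?_eq_idxOf?, List.idxOf?_eq_some_iff]
        refine ⟨by simp; omega, by simp [List.getElem_take, hjval], ?_⟩
        intro i hij
        rw [List.getElem_take]
        exact hjmin i hij
      have hBstep : pvB_go (f2 + 1) bank k acc
          = pvB_go f2 (PySem.List.slice bank (some ((j : Int) + 1)) none)
              (k - 1) (acc ++ PySem.Int.toStr w) := by
        rw [pvB_go]
        rw [if_neg (by omega)]
        rw [hsl, hmax]
        split
        · next heq => exact absurd heq (by simp)
        · next m2 heq =>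
          cases Option.some.inj heq
          rw [hwidx]
          simp only [Option.getD_some]
      rw [hBstep]
      have hdrop : PySem.List.slice bank (some ((j : Int) + 1)) none = bank.drop (j + 1) := by
        have ht : ((j : Int) + 1).toNat = j + 1 := by omega
        rw [PySem.List.slice_from bank (by omega), ht]
      -- the greedy pick sequence decomposes as w followed by the picks of the suffix
      have hpicks : pvPicks bank k = w :: pvPicks (bank.drop (j + 1)) (k - 1) := by
        have hmax' : PySem.List.max? (bank.take (bank.length - k.toNat + 1)) (fun y => y)
            = some w := by rw [hn]; exact hmax
        exact pv_picks_cons bank k w j hk1 hane hmax' hj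
      rw [hpicks] at hg
      simp only [pvGood, Bool.and_eq_true, Bool.or_eq_true, List.all_eq_true,
        decide_eq_true_eq] at hg
      -- A's first pick agrees, by the loop lemma applied to the initial exclusion state
      rw [pvA_compute]
      rw [if_neg hk0]
      rw [pv_loop f bank k acc w j W hk1 hW hmax hj hjW bank.length bank rfl
            (fun _ _ => rfl) (fun _ _ => Or.inl rfl) ?_ ?_]
      · -- recurse: the suffix is strictly shorter, fuel still suffices
        have hlen' : (PySem.List.slice bank (some ((j : Int) + 1)) none).length = n - (j + 1) := by
          rw [hdrop, List.length_drop, hn]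
        have hkn2 : k - 1 ≤ ((n - (j + 1) : Nat) : Int) := by
          have hj1 : j + 1 <= n := by omega
          omega
        have hg2 : pvGood (pvPicks (PySem.List.slice bank (some ((j : Int) + 1)) none) (k - 1))
            = true := by
          rw [hdrop]
          exact hg.2
        have hsz : n - (j + 1) < n := by omega
        exact IH (n - (j + 1)) hsz _ (k - 1) (acc ++ PySem.Int.toStr w) f f2 hlen'
          (by omega) (by omega) (by omega) hkn2 hg2
      · -- the window maximum bounds every bank entry, or it is at least -1
        by_cases hwn : -1 ≤ w
        · exact Or.inl hwn
        · right
          intro x hx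
          obtain ⟨p, hp, hxp⟩ := pv_all_le n bank k hn hk1 hkn x hx
          rw [hpicks] at hp
          rcases List.mem_cons.mp hp with rfl | hp'
          · exact hxp
          · rcases hg.1 with h | h
            · omega
            · exact le_trans hxp (h p hp')
      · -- initial fuel len(bank) exceeds the number of entries above the window maximum
        have hle := List.countP_le_length (l := bank) (p := fun x => decide (w < x))
        rcases lt_or_eq_of_le hle with h | h
        · omega
        · exfalso
          have := List.countP_eq_length.mp h bank[j] (by exact List.getElem_mem hjlt)
          rw [hjval] at this
          simp at this

-- ===== VERDICT (by name: the statement is the Claim_ definition above) =====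
theorem compute_bank_output_joltage_spec : Claim_equal_compute_bank_output_joltage := by
  intro bank k acc _ hpre
  unfold Spec_compute_bank_output_joltage
  obtain ⟨h0, hn, hG⟩ := hpre
  have hg : pvGood (pvPicks bank k) = true := by
    by_cases hk0 : k ≤ 0
    · rw [pv_picks_nil _ _ hk0]; rfl
    · rw [List.all_eq_true] at hG
      have hmem : pvPicks bank k ∈ List.sublistsLen k.toNat bank :=
        List.mem_sublistsLen.mpr ⟨pv_picks_sublist bank.length bank k rfl h0 hn,
          pv_picks_length bank.length bank k rfl h0 hn⟩
      have := hG _ hmem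
      rw [Bool.or_eq_true, Bool.not_eq_true'] at this
      rcases this with h | h
      · exfalso
        rw [List.all_eq_false] at h
        obtain ⟨M, hM, hMlex⟩ := h
        obtain ⟨hMs, hMl⟩ := List.mem_sublistsLen.mp hM
        simp only [Bool.not_eq_true, Bool.not_eq_false] at hMlex
        rw [pv_lexmax bank.length bank k M rfl h0 hn hMs hMl] at hMlex
        simp at hMlex
      · exact h
  unfold compute_bank_output_joltage compute_bank_output_joltage_alt
  exact pv_main bank.length bank k acc (bank.length + 1) (bank.length + 1) rfl (by omega) (by omega) h0 hn hg

theorem compute_bank_output_joltage_raises : Claim_raises_compute_bank_output_joltage := by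
  unfold Claim_raises_compute_bank_output_joltage
  constructor
  · intro bank k acc _ hr hp
    obtain ⟨h0, _, hG⟩ := hp
    rcases hr with h | ⟨_, _, h⟩
    · omega
    · rw [hG] at h; simp at h
  · exact ⟨by decide, by decide, by decide⟩

-- witness self-check, read off the crash-fix theorem: at ([-5, -2], 2, "") A raises and B returns "-5-2"
theorem pv_raises_witness_ok :
    Raises_compute_bank_output_joltage [-5, -2] 2 "" ∧
    compute_bank_output_joltage_alt [-5, -2] 2 "" = "-5-2" := by
  have h := compute_bank_output_joltage_raises
  unfold Claim_raises_compute_bank_output_joltage at h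
  exact ⟨h.2.2.1, h.2.2.2⟩
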